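-- pv_equiv track=rewrite | github.com/Bradley-Allen/USCUpstate | 236/ALLENGasPrices.py | lowestpriceyearly
-- ===== SOURCE A (Python) =====
-- def lowestpriceyearly(data):
--     lowestprices = {}
--     for entry in data:
--         year = entry[0]
--         price = entry[1]
--         if year in lowestprices:
--             if lowestprices[year] > price:
--                 lowestprices[year] = price
--         else:
--             lowestprices[year] = price
--     return lowestprices
-- ===== SOURCE B (Python) =====
-- def lowestpriceyearly(data):
--     # Recursive group-by-first-year: take the first year, compute its minimum
--     # price over the whole list in one comprehension, then recurse on the
--     # entries of the remaining years.
--     if not data: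
--         return {}
--     year = data[0][0]
--     m = min(p for y, p in data if y == year)
--     rest = [(y, p) for y, p in data if y != year]
--     out = {year: m}
--     out.update(lowestpriceyearly(rest))
--     return out
-- ===== Notes on version B (the rewrite author's own statement) =====
-- stated objective: alternative
-- what changed: Replaces the streaming dict-accumulated running-minimum with a recursive group-by: peel off the first year, take min() of all its prices in one comprehension, and recurse on the entries of the remaining years.
import Mathlib
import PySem

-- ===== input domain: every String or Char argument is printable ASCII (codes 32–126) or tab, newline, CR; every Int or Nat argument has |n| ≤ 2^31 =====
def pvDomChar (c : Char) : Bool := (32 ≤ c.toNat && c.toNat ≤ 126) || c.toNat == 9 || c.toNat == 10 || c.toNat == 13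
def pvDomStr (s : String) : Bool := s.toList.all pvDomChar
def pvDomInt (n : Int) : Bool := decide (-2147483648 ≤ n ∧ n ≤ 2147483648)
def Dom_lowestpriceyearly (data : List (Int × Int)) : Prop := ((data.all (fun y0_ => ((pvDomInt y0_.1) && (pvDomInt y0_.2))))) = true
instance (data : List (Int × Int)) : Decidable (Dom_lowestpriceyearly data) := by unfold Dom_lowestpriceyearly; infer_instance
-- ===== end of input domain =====

-- B replaces A's streaming dict running-minimum with a recursive group-by-first-year pass (alternative decomposition, same results).


-- ===== PORT A =====
-- loop body of A: membership test, then indexed compare-and-overwrite (indexing under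
-- the contains guard is exact as getD with a dummy default)
def pvStepA (d : PySem.Dict Int Int) (e : Int × Int) : PySem.Dict Int Int :=
  if d.contains e.1 then
    (if d.getD e.1 0 > e.2 then d.insert e.1 e.2 else d)
  else
    d.insert e.1 e.2

def lowestpriceyearly (data : List (Int × Int)) : List (Int × Int) :=
  (data.foldl pvStepA PySem.Dict.empty).items

-- ===== PORT B =====
-- min(generator) is PySem.List.min?; the list is nonempty (the head entry matches), so the
-- .getD 0 default is never used
def lowestpriceyearly_alt (data : List (Int × Int)) : List (Int × Int) :=
  match data with
  | [] => []
  | (y, p) :: t =>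
      let ps := (((y, p) :: t).filter (fun q => q.1 == y)).map (fun q => q.2)
      let m := (PySem.List.min? ps (fun x => x)).getD 0
      let rest := ((y, p) :: t).filter (fun q => q.1 != y)
      (y, m) :: lowestpriceyearly_alt rest
termination_by data.length
decreasing_by
  simp only [List.filter_cons, bne_self_eq_false, List.length_cons]
  have := List.length_filter_le (fun q => q.1 != y) t
  simp only [Bool.false_eq_true, if_false]
  omega

-- ===== PRECONDITION & SPEC =====
def Spec_lowestpriceyearly (data : List (Int × Int)) (out : List (Int × Int)) : Prop := out = lowestpriceyearly_alt data
instance (data : List (Int × Int)) (out : List (Int × Int)) : Decidable (Spec_lowestpriceyearly data out) := by unfold Spec_lowestpriceyearly; infer_instance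

-- ===== CLAIM (what is proved, stated in full; the proofs are below) =====
def Claim_equal_lowestpriceyearly : Prop := ∀ (data : List (Int × Int)), Dom_lowestpriceyearly data → Spec_lowestpriceyearly data (lowestpriceyearly data)

-- ===== LEMMAS AND PROOFS =====

-- running minimum as A's loop computes it
def pvRunMin (m : Int) (l : List Int) : Int := l.foldl (fun a p => if a > p then p else a) m

theorem pvRunMin_eq_foldl_min (l : List Int) : ∀ m : Int, pvRunMin m l = l.foldl min m := by
  induction l with
  | nil => intro m; rfl
  | cons x t ih =>
      intro m
      simp only [pvRunMin, List.foldl_cons] at *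
      rw [ih]
      congr 1
      simp only [min_def]; omega

theorem pvStepA_head_eq (y m p : Int) (d : List (Int × Int)) (hd : ∀ q ∈ d, q.1 ≠ y) :
    pvStepA ⟨(y, m) :: d⟩ (y, p) = ⟨(y, if m > p then p else m) :: d⟩ := by
  have hmap : d.map (fun q => if (q.1 == y) = true then (y, p) else q) = d := by
    conv_rhs => rw [← List.map_id d]
    apply List.map_congr_left
    intro q hq
    simp [hd q hq]
  unfold pvStepA PySem.Dict.insert
  have hc : (PySem.Dict.contains (⟨(y, m) :: d⟩ : PySem.Dict Int Int) y) = true := by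
    simp [PySem.Dict.contains]
  have hg : (PySem.Dict.getD (⟨(y, m) :: d⟩ : PySem.Dict Int Int) y 0) = m := by
    simp [PySem.Dict.getD, PySem.Dict.get?]
  simp only [hc, hg, if_true]
  split_ifs with hmp
  · simp only [List.map_cons, beq_self_eq_true, if_true, hmap]
  · simp

theorem pvStepA_head_ne (y m z p : Int) (d : List (Int × Int)) (hz : z ≠ y) :
    pvStepA ⟨(y, m) :: d⟩ (z, p) = ⟨(y, m) :: (pvStepA ⟨d⟩ (z, p)).items⟩ := by
  have hzy : (y == z) = false := by simp [Ne.symm hz]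
  unfold pvStepA PySem.Dict.insert
  have hc : (PySem.Dict.contains (⟨(y, m) :: d⟩ : PySem.Dict Int Int) z)
      = (PySem.Dict.contains (⟨d⟩ : PySem.Dict Int Int) z) := by
    simp [PySem.Dict.contains, hzy]
  have hg : (PySem.Dict.getD (⟨(y, m) :: d⟩ : PySem.Dict Int Int) z 0)
      = (PySem.Dict.getD (⟨d⟩ : PySem.Dict Int Int) z 0) := by
    simp [PySem.Dict.getD, PySem.Dict.get?, hzy]
  rw [hc, hg]
  by_cases hcz : (PySem.Dict.contains (⟨d⟩ : PySem.Dict Int Int) z) = true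
  · simp only [hcz, if_true]
    split_ifs with hp
    · simp [Ne.symm hz]
    · rfl
  · simp only [hcz, Bool.false_eq_true, if_false]
    simp

theorem pvStepA_keys {d : List (Int × Int)} {z p y : Int}
    (hd : ∀ q ∈ d, q.1 ≠ y) (he : z ≠ y) :
    ∀ q ∈ (pvStepA ⟨d⟩ (z, p)).items, q.1 ≠ y := by
  intro q hq
  unfold pvStepA PySem.Dict.insert at hq
  split_ifs at hq
  · simp only [List.mem_map] at hq
    obtain ⟨a, ha, hEq⟩ := hq
    by_cases haz : (a.1 == z) = true
    · rw [if_pos haz] at hEq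
      subst hEq
      exact he
    · rw [if_neg haz] at hEq
      subst hEq
      exact hd a ha
  · exact hd q hq
  · simp only [List.mem_append, List.mem_singleton] at hq
    rcases hq with hq | rfl
    · exact hd q hq
    · exact he

theorem loop_cons (l : List (Int × Int)) :
    ∀ (y m : Int) (d : List (Int × Int)), (∀ q ∈ d, q.1 ≠ y) →
      (l.foldl pvStepA ⟨(y, m) :: d⟩).items
        = (y, pvRunMin m ((l.filter (fun q => q.1 == y)).map (fun q => q.2)))
            :: ((l.filter (fun q => q.1 != y)).foldl pvStepA ⟨d⟩).items := by
  induction l with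
  | nil => intro y m d hd; simp [pvRunMin]
  | cons e t ih =>
      intro y m d hd
      obtain ⟨z, p⟩ := e
      by_cases hzy : z = y
      · subst hzy
        rw [List.foldl_cons, pvStepA_head_eq z m p d hd, ih z _ d hd]
        simp [pvRunMin]
      · rw [List.foldl_cons, pvStepA_head_ne y m z p d hzy,
            ih y m _ (pvStepA_keys hd hzy)]
        have h1 : (((z, p) :: t).filter (fun q => q.1 == y)) = t.filter (fun q => q.1 == y) := by
          simp [hzy]
        have h2 : (((z, p) :: t).filter (fun q => q.1 != y)) = (z, p) :: t.filter (fun q => q.1 != y) := by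
          simp [hzy]
        rw [h1, h2, List.foldl_cons]

theorem agree_len : ∀ n (data : List (Int × Int)), data.length ≤ n →
    lowestpriceyearly data = lowestpriceyearly_alt data := by
  intro n
  induction n with
  | zero =>
      intro data h
      have : data = [] := List.eq_nil_of_length_eq_zero (Nat.le_zero.mp h)
      subst this
      simp [lowestpriceyearly, lowestpriceyearly_alt, PySem.Dict.empty]
  | succ n ih =>
      intro data h
      match data with
      | [] => simp [lowestpriceyearly, lowestpriceyearly_alt, PySem.Dict.empty]
      | (y, p) :: t =>
          have hstep : pvStepA PySem.Dict.empty (y, p) = ⟨[(y, p)]⟩ := by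
            unfold pvStepA PySem.Dict.insert
            simp [PySem.Dict.contains, PySem.Dict.empty]
          rw [lowestpriceyearly, List.foldl_cons, hstep,
              loop_cons t y p [] (by simp)]
          have hrec : ((t.filter (fun q => q.1 != y)).foldl pvStepA ⟨[]⟩).items
              = lowestpriceyearly_alt (t.filter (fun q => q.1 != y)) := by
            have hlen : (t.filter (fun q => q.1 != y)).length ≤ n := by
              have := List.length_filter_le (fun q => q.1 != y) t
              simp at h; omega
            exact (ih _ hlen)
          rw [hrec]
          conv_rhs => rw [lowestpriceyearly_alt]
          simp only [List.filter_cons, beq_self_eq_true, if_true, bne_self_eq_false,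
            Bool.false_eq_true, if_false, List.map_cons]
          rw [PySem.List.min?_id_cons]
          simp only [Option.getD_some]
          rw [pvRunMin_eq_foldl_min]

-- ===== VERDICT (by name: the statement is the Claim_ definition above) =====
theorem lowestpriceyearly_spec : Claim_equal_lowestpriceyearly := by
  intro data _
  exact agree_len data.length data le_rfl
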